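-- pv_equiv track=rewrite | github.com/ZacharyMeis/102-week12 | Week12-utility.py | FindWordCount
-- ===== SOURCE A (Python) =====
-- def FindWordCount(l,s):
--     x = 0
--     for i in range(len(l)):
--         y = l[i].split()
--         for i in range(len(y)):
--             if y[i].lower() == s.lower():
--                 x += 1
--     return x
-- ===== SOURCE B (Python) =====
-- def FindWordCount(l, s):
--     counts = {}
--     for line in l:
--         for word in line.split():
--             w = word.lower()
--             counts[w] = counts.get(w, 0) + 1
--     return counts.get(s.lower(), 0)
-- ===== Notes on version B (the rewrite author's own statement) =====
-- stated objective: faster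
-- what changed: Replaces the compare-every-word-against-s loop (which recomputes s.lower() for every word) with building a lowercased word-frequency dictionary once and doing a single lookup of s.lower().
import Mathlib
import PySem

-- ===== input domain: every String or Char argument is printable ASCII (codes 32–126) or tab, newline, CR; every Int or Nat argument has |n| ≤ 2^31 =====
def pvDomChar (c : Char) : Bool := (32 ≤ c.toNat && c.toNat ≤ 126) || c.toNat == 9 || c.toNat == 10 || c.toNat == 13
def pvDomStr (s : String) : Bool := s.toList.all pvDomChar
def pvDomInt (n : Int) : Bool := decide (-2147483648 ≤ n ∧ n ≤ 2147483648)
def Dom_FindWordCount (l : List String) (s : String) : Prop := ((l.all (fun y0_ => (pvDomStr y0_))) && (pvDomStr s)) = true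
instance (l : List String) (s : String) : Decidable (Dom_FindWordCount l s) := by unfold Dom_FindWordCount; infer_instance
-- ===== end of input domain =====

-- B builds a lowercased word-frequency dictionary once and looks up s.lower(); return values are equal to A's on all inputs.
-- ===== PORT A =====
def FindWordCount (l : List String) (s : String) : Int :=
  (PySem.List.pyRange 0 l.length 1).foldl (fun x i =>
    let y := PySem.Str.split₀ (PySem.List.pyGetD l i "")
    (PySem.List.pyRange 0 y.length 1).foldl (fun x j =>
      if PySem.Str.lower (PySem.List.pyGetD y j "") == PySem.Str.lower s then x + 1 else x) x) 0

-- ===== PORT B =====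
def FindWordCount_alt (l : List String) (s : String) : Int :=
  let counts : PySem.Dict String Int := l.foldl (fun d line =>
    (PySem.Str.split₀ line).foldl (fun d word =>
      let w := PySem.Str.lower word
      d.insert w (d.getD w 0 + 1)) d) PySem.Dict.empty
  counts.getD (PySem.Str.lower s) 0

-- ===== PRECONDITION & SPEC =====
def Spec_FindWordCount (l : List String) (s : String) (out : Int) : Prop := out = FindWordCount_alt l s
instance (l : List String) (s : String) (out : Int) : Decidable (Spec_FindWordCount l s out) := by unfold Spec_FindWordCount; infer_instance

-- ===== CLAIM (what is proved, stated in full; the proofs are below) =====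
def Claim_equal_FindWordCount : Prop := ∀ (l : List String) (s : String), Dom_FindWordCount l s → Spec_FindWordCount l s (FindWordCount l s)

-- ===== LEMMAS AND PROOFS =====
lemma b_inv (k : String) (l : List String) (d : PySem.Dict String Int) :
    (l.foldl (fun d line =>
      (PySem.Str.split₀ line).foldl (fun d word =>
        let w := PySem.Str.lower word
        d.insert w (d.getD w 0 + 1)) d) d).getD k 0
    = d.getD k 0 + ((l.flatMap (fun line => (PySem.Str.split₀ line).map PySem.Str.lower)).count k : Int) := by
  induction l generalizing d with
  | nil => simp
  | cons line rest ih =>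
    simp only [List.foldl_cons, ih, List.flatMap_cons, List.count_append]
    have h : ((PySem.Str.split₀ line).foldl (fun d word =>
        let w := PySem.Str.lower word
        d.insert w (d.getD w 0 + 1)) d)
        = (((PySem.Str.split₀ line).map PySem.Str.lower).foldl
            (fun d x => d.insert x (d.getD x 0 + 1)) d) := by
      rw [List.foldl_map]
    rw [h, PySem.Dict.getD_foldl_insert_add_one]
    push_cast
    ring

lemma a_sum (k : String) (l : List String) (x : Int) :
    l.foldl (fun x line =>
      ((PySem.Str.split₀ line).foldl (fun x w =>
        if PySem.Str.lower w == k then x + 1 else x) x)) x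
    = x + ((l.flatMap (fun line => (PySem.Str.split₀ line).map PySem.Str.lower)).count k : Int) := by
  induction l generalizing x with
  | nil => simp
  | cons line rest ih =>
    simp only [List.foldl_cons, ih, List.flatMap_cons, List.count_append]
    rw [PySem.List.foldl_if_add_one]
    have : ((PySem.Str.split₀ line).map PySem.Str.lower).count k
        = (PySem.Str.split₀ line).countP (fun w => PySem.Str.lower w == k) := by
      simp [List.count, List.countP_map, Function.comp_def]
    rw [this]
    push_cast
    ring

-- ===== VERDICT (by name: the statement is the Claim_ definition above) =====
theorem FindWordCount_spec : Claim_equal_FindWordCount := by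
  intro l s _
  unfold Spec_FindWordCount
  simp only [FindWordCount, FindWordCount_alt]
  rw [PySem.List.foldl_pyRange_zero_pyGetD' l ""
    (fun x line =>
      (PySem.List.pyRange 0 ((PySem.Str.split₀ line).length : Int) 1).foldl (fun x j =>
        if PySem.Str.lower (PySem.List.pyGetD (PySem.Str.split₀ line) j "") == PySem.Str.lower s
        then x + 1 else x) x) 0]
  rw [b_inv]
  simp only [PySem.Dict.getD_empty]
  have step : ∀ (x : Int) (line : String),
      (PySem.List.pyRange 0 (PySem.Str.split₀ line).length 1).foldl (fun x j =>
        if PySem.Str.lower (PySem.List.pyGetD (PySem.Str.split₀ line) j "") == PySem.Str.lower s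
        then x + 1 else x) x
      = (PySem.Str.split₀ line).foldl (fun x w =>
          if PySem.Str.lower w == PySem.Str.lower s then x + 1 else x) x := by
    intro x line
    exact PySem.List.foldl_pyRange_zero_pyGetD' (PySem.Str.split₀ line) ""
      (fun x w => if PySem.Str.lower w == PySem.Str.lower s then x + 1 else x) x
  simp only [step]
  rw [a_sum]
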